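-- pv_equiv track=rewrite | github.com/Prince30112002/AI-Career-Coach | src/career_recommender.py | recommend_careers
-- ===== SOURCE A (Python) =====
-- from collections import Counter
--
-- CAREER_MAP = {
--     "data scientist": {"python", "machine learning", "deep learning", "tensorflow", "statistics"},
--     "data analyst": {"sql", "power bi", "excel", "python"},
--     "machine learning engineer": {"python", "machine learning", "tensorflow"},
--     "nlp engineer": {"nlp", "deep learning", "python"},
--     "ai engineer": {"python", "machine learning", "deep learning", "nlp"}
-- }
--
-- def recommend_careers(skills, top_n=3):
--     skills = set(skill.lower() for skill in skills)
--     scores = {}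
--
--     for career, required_skills in CAREER_MAP.items():
--         match_score = len(skills.intersection(required_skills))
--         if match_score > 0:
--             scores[career] = match_score
--
--     ranked = Counter(scores).most_common(top_n)
--     return ranked
-- ===== SOURCE B (Python) =====
-- CAREER_MAP = {
--     "data scientist": {"python", "machine learning", "deep learning", "tensorflow", "statistics"},
--     "data analyst": {"sql", "power bi", "excel", "python"},
--     "machine learning engineer": {"python", "machine learning", "tensorflow"},
--     "nlp engineer": {"nlp", "deep learning", "python"},
--     "ai engineer": {"python", "machine learning", "deep learning", "nlp"}
-- }
--
-- def recommend_careers(skills, top_n=3):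
--     have = set(skill.lower() for skill in skills)
--     buckets = {}
--     for career, required_skills in CAREER_MAP.items():
--         score = len(have & required_skills)
--         if score > 0:
--             buckets.setdefault(score, []).append(career)
--     result = []
--     for score in range(5, 0, -1):
--         for career in buckets.get(score, []):
--             if len(result) < top_n:
--                 result.append((career, score))
--     return result
-- ===== Notes on version B (the rewrite author's own statement) =====
-- stated objective: alternative
-- what changed: Ranking no longer goes through Counter.most_common's comparison sort: positive match scores are grouped into score-keyed buckets (insertion order preserved) and the result is collected by walking scores 5 down to 1 with a top_n guard, which reproduces most_common's stable descending order and its non-positive/oversized top_n edge cases.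
import Mathlib
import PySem

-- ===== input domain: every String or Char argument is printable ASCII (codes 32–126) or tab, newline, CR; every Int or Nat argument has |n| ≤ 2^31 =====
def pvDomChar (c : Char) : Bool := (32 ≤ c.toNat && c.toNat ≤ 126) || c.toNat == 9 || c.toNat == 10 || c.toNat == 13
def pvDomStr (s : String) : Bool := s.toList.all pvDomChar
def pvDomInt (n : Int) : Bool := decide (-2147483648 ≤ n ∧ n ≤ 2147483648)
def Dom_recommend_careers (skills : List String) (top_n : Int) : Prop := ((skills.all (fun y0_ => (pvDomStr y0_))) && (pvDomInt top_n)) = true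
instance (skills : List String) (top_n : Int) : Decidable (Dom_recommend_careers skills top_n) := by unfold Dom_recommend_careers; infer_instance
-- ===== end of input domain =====

-- B replaces Counter.most_common's sort-based ranking by score buckets walked from 5 down to 1
-- (objective: alternative ranking algorithm, same result). Equivalence is about return values; neither version mutates its arguments.

-- ===== PORT A =====
-- the module-level CAREER_MAP (Python set literals as their element lists; only membership/len are taken)
def CAREER_MAP : List (String × List String) := [
  ("data scientist", ["python", "machine learning", "deep learning", "tensorflow", "statistics"]),
  ("data analyst", ["sql", "power bi", "excel", "python"]),
  ("machine learning engineer", ["python", "machine learning", "tensorflow"]),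
  ("nlp engineer", ["nlp", "deep learning", "python"]),
  ("ai engineer", ["python", "machine learning", "deep learning", "nlp"])]

def recommend_careers (skills : List String) (top_n : Int) : List (String × Int) :=
  let skillsSet : PySem.Set String := PySem.Set.ofList (skills.map PySem.Str.lower)
  let scores : PySem.Dict String Int :=
    CAREER_MAP.foldl (fun d e =>
      let match_score := PySem.Set.len (PySem.Set.inter skillsSet e.2)
      if match_score > 0 then d.insert e.1 match_score else d) PySem.Dict.empty
  -- Counter(scores).most_common(top_n): items stably sorted by count descending, first max(top_n, 0)
  -- of them (heapq.nlargest(n, …) == sorted(…, reverse=True)[:n]; n ≤ 0 yields []).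
  (PySem.List.sorted (PySem.Dict.items scores) (fun p => p.2) true).take top_n.toNat

-- ===== PORT B =====
def recommend_careers_alt (skills : List String) (top_n : Int) : List (String × Int) :=
  let have_ : PySem.Set String := PySem.Set.ofList (skills.map PySem.Str.lower)
  let buckets : PySem.Dict Int (List String) :=
    CAREER_MAP.foldl (fun d e =>
      let score := PySem.Set.len (PySem.Set.inter have_ e.2)
      -- buckets.setdefault(score, []).append(career)
      if score > 0 then d.modify score [] (· ++ [e.1]) else d) PySem.Dict.empty
  -- for score in range(5, 0, -1): for career in buckets.get(score, []): guarded append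
  (PySem.List.pyRange 5 0 (-1)).foldl (fun result score =>
    (buckets.getD score []).foldl (fun r career =>
      if PySem.List.len r < top_n then r ++ [(career, score)] else r) result) []

-- ===== PRECONDITION & SPEC =====
def Spec_recommend_careers (skills : List String) (top_n : Int) (out : List (String × Int)) : Prop := out = recommend_careers_alt skills top_n
instance (skills : List String) (top_n : Int) (out : List (String × Int)) : Decidable (Spec_recommend_careers skills top_n out) := by unfold Spec_recommend_careers; infer_instance

-- ===== CLAIM (what is proved, stated in full; the proofs are below) =====
def Claim_equal_recommend_careers : Prop := ∀ (skills : List String) (top_n : Int), Dom_recommend_careers skills top_n → Spec_recommend_careers skills top_n (recommend_careers skills top_n)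

-- ===== LEMMAS AND PROOFS =====

-- the match score of one career row against the (lowered, deduplicated) skill set
def mscore (skills : List String) (req : List String) : Int :=
  PySem.Set.len (PySem.Set.inter (PySem.Set.ofList (skills.map PySem.Str.lower)) req)

-- the scores as a 5-entry association list, abstracted over the five match scores
def entriesOf (m1 m2 m3 m4 m5 : Int) : List (String × Int) :=
  [("data scientist", m1), ("data analyst", m2), ("machine learning engineer", m3),
   ("nlp engineer", m4), ("ai engineer", m5)]

-- A's ranking before truncation, abstracted over the five match scores
def sideA (m1 m2 m3 m4 m5 : Int) : List (String × Int) :=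
  PySem.List.sorted (PySem.Dict.items ((entriesOf m1 m2 m3 m4 m5).foldl
    (fun d e => if e.2 > 0 then d.insert e.1 e.2 else d) PySem.Dict.empty)) (fun p => p.2) true

-- B's bucket walk before truncation, abstracted over the five match scores
def sideB (m1 m2 m3 m4 m5 : Int) : List (String × Int) :=
  let buckets : PySem.Dict Int (List String) := (entriesOf m1 m2 m3 m4 m5).foldl
    (fun d e => if e.2 > 0 then d.modify e.2 [] (· ++ [e.1]) else d) PySem.Dict.empty
  (PySem.List.pyRange 5 0 (-1)).flatMap (fun score => (buckets.getD score []).map (fun c => (c, score)))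

-- the guarded-append inner loop is a take of the mapped list
lemma inner_collect {γ β : Type} (n : Int) (g : γ → β) :
    ∀ (L : List γ) (r : List β), L.foldl (fun r c => if PySem.List.len r < n then r ++ [g c] else r) r
      = r ++ ((L.map g).take (n.toNat - r.length)) := by
  intro L
  induction L with
  | nil => intro r; simp
  | cons c L ih =>
    intro r
    simp only [List.foldl_cons, List.map_cons]
    by_cases h : PySem.List.len r < n
    · rw [if_pos h, ih]
      have h' : r.length < n.toNat := by simp [PySem.List.len] at h; omega
      have : n.toNat - r.length = (n.toNat - (r.length + 1)) + 1 := by omega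
      rw [this, List.take_succ_cons]
      simp
    · rw [if_neg h, ih]
      have h' : n.toNat - r.length = 0 := by simp [PySem.List.len] at h; omega
      simp [h']

-- B's whole nested loop is a take of the flattened buckets
lemma outer_collect (n : Int) (f : Int → List String) :
    ∀ (levels : List Int) (r : List (String × Int)),
      levels.foldl (fun res sc => (f sc).foldl
          (fun r c => if PySem.List.len r < n then r ++ [(c, sc)] else r) res) r
        = r ++ ((levels.flatMap (fun sc => (f sc).map (fun c => (c, sc)))).take (n.toNat - r.length)) := by
  intro levels
  induction levels with
  | nil => intro r; simp
  | cons sc levels ih =>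
    intro r
    simp only [List.foldl_cons, List.flatMap_cons]
    rw [inner_collect n (fun c => (c, sc)), ih]
    rw [List.append_assoc, List.take_append]
    congr 2
    simp [List.length_take]
    omega

lemma A_eq (skills : List String) (top_n : Int) :
    recommend_careers skills top_n
      = (sideA (mscore skills ["python", "machine learning", "deep learning", "tensorflow", "statistics"])
               (mscore skills ["sql", "power bi", "excel", "python"])
               (mscore skills ["python", "machine learning", "tensorflow"])
               (mscore skills ["nlp", "deep learning", "python"])
               (mscore skills ["python", "machine learning", "deep learning", "nlp"])).take top_n.toNat := rfl

lemma B_eq (skills : List String) (top_n : Int) :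
    recommend_careers_alt skills top_n
      = (sideB (mscore skills ["python", "machine learning", "deep learning", "tensorflow", "statistics"])
               (mscore skills ["sql", "power bi", "excel", "python"])
               (mscore skills ["python", "machine learning", "tensorflow"])
               (mscore skills ["nlp", "deep learning", "python"])
               (mscore skills ["python", "machine learning", "deep learning", "nlp"])).take top_n.toNat := by
  simp only [recommend_careers_alt]
  rw [outer_collect top_n]
  simp only [List.nil_append, Nat.sub_zero, List.length_nil]
  rfl

-- match scores are bounded by the career row's size
lemma mscore_nonneg (skills req : List String) : 0 ≤ mscore skills req := by
  simp [mscore, PySem.Set.len]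

lemma mscore_le (skills req : List String) : mscore skills req ≤ req.length := by
  have hnd : (PySem.Set.inter (PySem.Set.ofList (skills.map PySem.Str.lower)) req).Nodup :=
    (PySem.Set.nodup_ofList _).filter _
  have hsub : (PySem.Set.inter (PySem.Set.ofList (skills.map PySem.Str.lower)) req) ⊆ req := by
    intro x hx
    simp [PySem.Set.inter, List.mem_filter] at hx
    exact hx.2
  have := (List.subperm_of_subset hnd hsub).length_le
  simp [mscore, PySem.Set.len]
  omega

-- the combinatorial core: for every possible combination of match scores, A's stable
-- descending sort of the score list equals B's bucket concatenation
set_option maxHeartbeats 2000000 in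
lemma key : ∀ (a : Fin 6) (b : Fin 5) (c : Fin 4) (d : Fin 4) (e : Fin 5),
    sideA a b c d e = sideB a b c d e := by decide

-- ===== VERDICT (by name: the statement is the Claim_ definition above) =====
theorem recommend_careers_spec : Claim_equal_recommend_careers := by
  intro skills top_n _
  unfold Spec_recommend_careers
  rw [A_eq, B_eq]
  congr 1
  have h1l := mscore_nonneg skills ["python", "machine learning", "deep learning", "tensorflow", "statistics"]
  have h1r := mscore_le skills ["python", "machine learning", "deep learning", "tensorflow", "statistics"]
  have h2l := mscore_nonneg skills ["sql", "power bi", "excel", "python"]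
  have h2r := mscore_le skills ["sql", "power bi", "excel", "python"]
  have h3l := mscore_nonneg skills ["python", "machine learning", "tensorflow"]
  have h3r := mscore_le skills ["python", "machine learning", "tensorflow"]
  have h4l := mscore_nonneg skills ["nlp", "deep learning", "python"]
  have h4r := mscore_le skills ["nlp", "deep learning", "python"]
  have h5l := mscore_nonneg skills ["python", "machine learning", "deep learning", "nlp"]
  have h5r := mscore_le skills ["python", "machine learning", "deep learning", "nlp"]
  simp only [List.length_cons, List.length_nil] at h1r h2r h3r h4r h5r
  have hk := key ⟨(mscore skills ["python", "machine learning", "deep learning", "tensorflow", "statistics"]).toNat, by omega⟩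
                ⟨(mscore skills ["sql", "power bi", "excel", "python"]).toNat, by omega⟩
                ⟨(mscore skills ["python", "machine learning", "tensorflow"]).toNat, by omega⟩
                ⟨(mscore skills ["nlp", "deep learning", "python"]).toNat, by omega⟩
                ⟨(mscore skills ["python", "machine learning", "deep learning", "nlp"]).toNat, by omega⟩
  simpa [Int.toNat_of_nonneg, h1l, h2l, h3l, h4l, h5l] using hk
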